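-- pv_equiv track=rewrite | github.com/Evepp/covid_image_task_dlg9 | functions.py | collect_labels
-- ===== SOURCE A (Python) =====
-- def collect_labels(data, labels):
--
--     img_label_dict = {}
--
--     # relate image and label index in dictionary
--     for i in range(len(labels)):
--         img_label_dict[i] = labels[i]
--
--
--     # Store all the indexes by label
--     BP_index = {k for k,v in img_label_dict.items() if v == 'Bacterial Pneumonia'}
--     VP_index = {k for k,v in img_label_dict.items() if v == 'Viral Pneumonia'}
--     NP_index = {k for k,v in img_label_dict.items() if v == 'No Pneumonia (healthy)'}
--
--     CV_index = {k for k,v in img_label_dict.items() if v == 'COVID-19'}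
--
--     return [BP_index, NP_index, VP_index, CV_index], img_label_dict
-- ===== SOURCE B (Python) =====
-- def collect_labels(data, labels):
--     # single classifying pass: fill the dict and the four index sets together
--     img_label_dict = {}
--     BP_index, NP_index, VP_index, CV_index = set(), set(), set(), set()
--     for i, label in enumerate(labels):
--         img_label_dict[i] = label
--         if label == 'Bacterial Pneumonia':
--             BP_index.add(i)
--         elif label == 'No Pneumonia (healthy)':
--             NP_index.add(i)
--         elif label == 'Viral Pneumonia':
--             VP_index.add(i)
--         elif label == 'COVID-19':
--             CV_index.add(i)
--     return [BP_index, NP_index, VP_index, CV_index], img_label_dict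
-- ===== Notes on version B (the rewrite author's own statement) =====
-- stated objective: simpler
-- what changed: Replaces the dict-building loop plus four separate set-comprehension scans over the dict items with one classifying pass that fills the dict and all four index sets via an if/elif chain.
import Mathlib
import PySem

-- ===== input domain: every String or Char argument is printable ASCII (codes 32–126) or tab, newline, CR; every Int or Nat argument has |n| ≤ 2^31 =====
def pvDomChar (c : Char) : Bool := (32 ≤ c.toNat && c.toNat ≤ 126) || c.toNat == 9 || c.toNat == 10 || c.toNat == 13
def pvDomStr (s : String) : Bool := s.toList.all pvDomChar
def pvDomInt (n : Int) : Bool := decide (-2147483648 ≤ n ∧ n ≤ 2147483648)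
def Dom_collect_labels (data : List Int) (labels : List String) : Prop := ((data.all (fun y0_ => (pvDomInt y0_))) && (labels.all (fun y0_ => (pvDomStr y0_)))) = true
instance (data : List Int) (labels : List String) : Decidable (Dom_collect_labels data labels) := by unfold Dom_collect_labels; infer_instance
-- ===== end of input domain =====

-- B replaces A's dict-building loop plus four separate set-comprehension scans with one
-- classifying pass (if/elif chain) filling the dict and all four index sets together: simpler.

-- ===== PORT A =====
def collect_labels (data : List Int) (labels : List String) : List (List Int) × (List (Int × String)) :=
  let img_label_dict : PySem.Dict Int String :=
    (PySem.List.pyRange 0 (labels.length : Int) 1).foldl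
      (fun d i => d.insert i (PySem.List.pyGetD labels i "")) PySem.Dict.empty
  let BP_index : PySem.Set Int :=
    PySem.Set.ofList ((img_label_dict.items.filter (fun kv => kv.2 == "Bacterial Pneumonia")).map (fun kv => kv.1))
  let VP_index : PySem.Set Int :=
    PySem.Set.ofList ((img_label_dict.items.filter (fun kv => kv.2 == "Viral Pneumonia")).map (fun kv => kv.1))
  let NP_index : PySem.Set Int :=
    PySem.Set.ofList ((img_label_dict.items.filter (fun kv => kv.2 == "No Pneumonia (healthy)")).map (fun kv => kv.1))
  let CV_index : PySem.Set Int :=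
    PySem.Set.ofList ((img_label_dict.items.filter (fun kv => kv.2 == "COVID-19")).map (fun kv => kv.1))
  ([BP_index, NP_index, VP_index, CV_index], img_label_dict.items)

-- ===== PORT B =====
-- the loop body of Source B's single pass (dict insert + if/elif classification)
def pvStep (st : PySem.Dict Int String × PySem.Set Int × PySem.Set Int × PySem.Set Int × PySem.Set Int)
    (p : Int × String) :
    PySem.Dict Int String × PySem.Set Int × PySem.Set Int × PySem.Set Int × PySem.Set Int :=
  let d := st.1.insert p.1 p.2
  if p.2 == "Bacterial Pneumonia" then (d, PySem.Set.add st.2.1 p.1, st.2.2.1, st.2.2.2.1, st.2.2.2.2)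
  else if p.2 == "No Pneumonia (healthy)" then (d, st.2.1, PySem.Set.add st.2.2.1 p.1, st.2.2.2.1, st.2.2.2.2)
  else if p.2 == "Viral Pneumonia" then (d, st.2.1, st.2.2.1, PySem.Set.add st.2.2.2.1 p.1, st.2.2.2.2)
  else if p.2 == "COVID-19" then (d, st.2.1, st.2.2.1, st.2.2.2.1, PySem.Set.add st.2.2.2.2 p.1)
  else (d, st.2.1, st.2.2.1, st.2.2.2.1, st.2.2.2.2)

def collect_labels_alt (data : List Int) (labels : List String) : List (List Int) × (List (Int × String)) :=
  let st := (PySem.List.enumerate labels 0).foldl pvStep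
    (PySem.Dict.empty, PySem.Set.empty, PySem.Set.empty, PySem.Set.empty, PySem.Set.empty)
  ([st.2.1, st.2.2.1, st.2.2.2.1, st.2.2.2.2], st.1.items)

-- ===== PRECONDITION & SPEC =====
def Spec_collect_labels (data : List Int) (labels : List String) (out : List (List Int) × (List (Int × String))) : Prop := out = collect_labels_alt data labels
instance (data : List Int) (labels : List String) (out : List (List Int) × (List (Int × String))) : Decidable (Spec_collect_labels data labels out) := by unfold Spec_collect_labels; infer_instance

-- ===== CLAIM (what is proved, stated in full; the proofs are below) =====
def Claim_equal_collect_labels : Prop := ∀ (data : List Int) (labels : List String), Dom_collect_labels data labels → Spec_collect_labels data labels (collect_labels data labels)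

-- ===== LEMMAS AND PROOFS =====

-- indices of the entries of L whose label equals t, in order
def pvFilt (L : List (Int × String)) (t : String) : List Int :=
  (L.filter (fun kv => kv.2 == t)).map (fun kv => kv.1)

lemma pvFilt_cons (s : Int) (x : String) (L : List (Int × String)) (t : String) :
    pvFilt ((s, x) :: L) t = (if x = t then [s] else []) ++ pvFilt L t := by
  by_cases h : x = t <;> simp [pvFilt, h]

lemma mk_contains_false (acc : List (Int × String)) (s : Int)
    (h : ∀ p ∈ acc, p.1 < s) : (PySem.Dict.mk acc).contains s = false := by
  simp only [PySem.Dict.contains, List.any_eq_false]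
  intro p hp
  have := h p hp
  simp; omega

lemma set_contains_false (l : List Int) (s : Int) (h : ∀ x ∈ l, x < s) :
    PySem.Set.contains l s = false := by
  simp only [PySem.Set.contains, List.contains_eq_mem, decide_eq_false_iff_not]
  exact fun hmem => lt_irrefl s (h s hmem)

lemma set_add_fresh (l : List Int) (s : Int) (h : ∀ x ∈ l, x < s) :
    PySem.Set.add l s = l ++ [s] := by
  simp only [PySem.Set.add, set_contains_false l s h, Bool.false_eq_true, if_false]

lemma dict_insert_fresh (acc : List (Int × String)) (s : Int) (x : String)
    (h : ∀ p ∈ acc, p.1 < s) :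
    (PySem.Dict.mk acc).insert s x = PySem.Dict.mk (acc ++ [(s, x)]) := by
  simp [PySem.Dict.insert, mk_contains_false acc s h]

lemma dict_items_foldl (xs : List String) : ∀ (s : Int) (acc : List (Int × String)),
    (∀ p ∈ acc, p.1 < s) →
    ((PySem.List.enumerate xs s).foldl
      (fun (d : PySem.Dict Int String) p => d.insert p.1 p.2) (PySem.Dict.mk acc))
      = PySem.Dict.mk (acc ++ PySem.List.enumerate xs s) := by
  induction xs with
  | nil => intro s acc _; simp [PySem.List.enumerate_nil]
  | cons x xs ih =>
    intro s acc h
    rw [PySem.List.enumerate_cons]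
    simp only [List.foldl_cons]
    rw [dict_insert_fresh acc s x h]
    rw [ih (s + 1) (acc ++ [(s, x)]) ?_]
    · simp
    · intro p hp
      rcases List.mem_append.1 hp with h1 | h1
      · exact lt_trans (h p h1) (by omega)
      · obtain rfl : p = (s, x) := by simpa using h1
        exact lt_add_one s

lemma alt_foldl (xs : List String) : ∀ (s : Int) (acc : List (Int × String)) (bp np vp cv : PySem.Set Int),
    (∀ p ∈ acc, p.1 < s) → (∀ x ∈ bp, x < s) → (∀ x ∈ np, x < s) →
    (∀ x ∈ vp, x < s) → (∀ x ∈ cv, x < s) →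
    (PySem.List.enumerate xs s).foldl pvStep (PySem.Dict.mk acc, bp, np, vp, cv)
      = (PySem.Dict.mk (acc ++ PySem.List.enumerate xs s),
         bp ++ pvFilt (PySem.List.enumerate xs s) "Bacterial Pneumonia",
         np ++ pvFilt (PySem.List.enumerate xs s) "No Pneumonia (healthy)",
         vp ++ pvFilt (PySem.List.enumerate xs s) "Viral Pneumonia",
         cv ++ pvFilt (PySem.List.enumerate xs s) "COVID-19") := by
  induction xs with
  | nil =>
    intro s acc bp np vp cv _ _ _ _ _
    simp [PySem.List.enumerate_nil, pvFilt]
  | cons x xs ih =>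
    intro s acc bp np vp cv hacc hbp hnp hvp hcv
    rw [PySem.List.enumerate_cons]
    simp only [List.foldl_cons]
    have hstep : pvStep (PySem.Dict.mk acc, bp, np, vp, cv) (s, x)
        = (PySem.Dict.mk (acc ++ [(s, x)]),
           if x = "Bacterial Pneumonia" then bp ++ [s] else bp,
           if x = "No Pneumonia (healthy)" then np ++ [s] else np,
           if x = "Viral Pneumonia" then vp ++ [s] else vp,
           if x = "COVID-19" then cv ++ [s] else cv) := by
      simp only [pvStep, dict_insert_fresh acc s x hacc]
      by_cases h1 : x = "Bacterial Pneumonia"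
      · simp [h1, set_add_fresh bp s hbp]
      by_cases h2 : x = "No Pneumonia (healthy)"
      · simp [h2, set_add_fresh np s hnp]
      by_cases h3 : x = "Viral Pneumonia"
      · simp [h3, set_add_fresh vp s hvp]
      by_cases h4 : x = "COVID-19"
      · simp [h4, set_add_fresh cv s hcv]
      · simp [h1, h2, h3, h4]
    rw [hstep]
    rw [ih (s + 1) (acc ++ [(s, x)])
        (if x = "Bacterial Pneumonia" then bp ++ [s] else bp)
        (if x = "No Pneumonia (healthy)" then np ++ [s] else np)
        (if x = "Viral Pneumonia" then vp ++ [s] else vp)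
        (if x = "COVID-19" then cv ++ [s] else cv)
        ?_ ?_ ?_ ?_ ?_]
    · refine Prod.ext ?_ (Prod.ext ?_ (Prod.ext ?_ (Prod.ext ?_ ?_)))
      · simp
      · show _ = bp ++ pvFilt ((s, x) :: PySem.List.enumerate xs (s + 1)) "Bacterial Pneumonia"
        rw [pvFilt_cons]; by_cases h : x = "Bacterial Pneumonia" <;> simp [h]
      · show _ = np ++ pvFilt ((s, x) :: PySem.List.enumerate xs (s + 1)) "No Pneumonia (healthy)"
        rw [pvFilt_cons]; by_cases h : x = "No Pneumonia (healthy)" <;> simp [h]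
      · show _ = vp ++ pvFilt ((s, x) :: PySem.List.enumerate xs (s + 1)) "Viral Pneumonia"
        rw [pvFilt_cons]; by_cases h : x = "Viral Pneumonia" <;> simp [h]
      · show _ = cv ++ pvFilt ((s, x) :: PySem.List.enumerate xs (s + 1)) "COVID-19"
        rw [pvFilt_cons]; by_cases h : x = "COVID-19" <;> simp [h]
    · intro p hp
      rcases List.mem_append.1 hp with h1 | h1
      · exact lt_trans (hacc p h1) (by omega)
      · obtain rfl : p = (s, x) := by simpa using h1
        exact lt_add_one s
    all_goals
      intro y hy
      split_ifs at hy with h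
      · rcases List.mem_append.1 hy with h1 | h1
        · first
          | exact lt_trans (hbp y h1) (by omega)
          | exact lt_trans (hnp y h1) (by omega)
          | exact lt_trans (hvp y h1) (by omega)
          | exact lt_trans (hcv y h1) (by omega)
        · simp at h1; omega
      · first
        | exact lt_trans (hbp y hy) (by omega)
        | exact lt_trans (hnp y hy) (by omega)
        | exact lt_trans (hvp y hy) (by omega)
        | exact lt_trans (hcv y hy) (by omega)

lemma ofList_nodup (l : List Int) (h : l.Nodup) : PySem.Set.ofList l = l := by
  have key : ∀ (l acc : List Int), (∀ x ∈ l, x ∉ acc) → l.Nodup →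
      List.foldl PySem.Set.add acc l = acc ++ l := by
    intro l
    induction l with
    | nil => intro acc _ _; simp
    | cons x xs ih =>
      intro acc hfresh hnd
      have hx : PySem.Set.add acc x = acc ++ [x] := by
        simp [PySem.Set.add, PySem.Set.contains, List.contains_eq_mem, hfresh x (by simp)]
      simp only [List.foldl_cons, hx]
      rw [ih (acc ++ [x]) ?_ (List.Nodup.of_cons hnd)]
      · simp
      · intro y hy
        simp only [List.mem_append, List.mem_singleton]
        rintro (h1 | h1)
        · exact hfresh y (by simp [hy]) h1
        · exact (List.nodup_cons.1 hnd).1 (h1 ▸ hy)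
  rw [PySem.Set.ofList_eq_foldl]
  simpa using key l [] (by simp) h

lemma pvFilt_nodup (L : List (Int × String)) (t : String)
    (h : L.Pairwise (fun p q => p.1 < q.1)) : (pvFilt L t).Nodup := by
  unfold pvFilt
  rw [List.nodup_iff_pairwise_ne]
  refine List.Pairwise.map _ ?_ (List.Pairwise.filter _ h)
  intro a b hab; omega

lemma collect_labels_eq (data : List Int) (labels : List String) :
    collect_labels data labels =
      ([pvFilt (PySem.List.enumerate labels 0) "Bacterial Pneumonia",
        pvFilt (PySem.List.enumerate labels 0) "No Pneumonia (healthy)",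
        pvFilt (PySem.List.enumerate labels 0) "Viral Pneumonia",
        pvFilt (PySem.List.enumerate labels 0) "COVID-19"],
       PySem.List.enumerate labels 0) := by
  have hw : (PySem.List.enumerate labels 0).Pairwise (fun p q => p.1 < q.1) :=
    PySem.List.pairwise_lt_enumerate labels 0
  have henum : PySem.List.enumerate labels 0
      = (PySem.List.pyRange 0 (labels.length : Int) 1).map
          (fun j => (j, PySem.List.pyGetD labels j "")) :=
    PySem.List.enumerate_eq_map_pyRange labels ""
  have hfold :
      ((PySem.List.pyRange 0 (labels.length : Int) 1).foldl
        (fun (d : PySem.Dict Int String) i => d.insert i (PySem.List.pyGetD labels i ""))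
        PySem.Dict.empty)
      = PySem.Dict.mk (PySem.List.enumerate labels 0) := by
    have : ((PySem.List.pyRange 0 (labels.length : Int) 1).map
          (fun j => (j, PySem.List.pyGetD labels j ""))).foldl
        (fun (d : PySem.Dict Int String) p => d.insert p.1 p.2) (PySem.Dict.mk [])
        = PySem.Dict.mk ([] ++ PySem.List.enumerate labels 0) := by
      rw [← henum]
      exact dict_items_foldl labels 0 [] (by simp)
    rw [List.foldl_map] at this
    simpa [PySem.Dict.empty] using this
  simp only [collect_labels, hfold]
  show ([PySem.Set.ofList (pvFilt (PySem.List.enumerate labels 0) "Bacterial Pneumonia"),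
         PySem.Set.ofList (pvFilt (PySem.List.enumerate labels 0) "No Pneumonia (healthy)"),
         PySem.Set.ofList (pvFilt (PySem.List.enumerate labels 0) "Viral Pneumonia"),
         PySem.Set.ofList (pvFilt (PySem.List.enumerate labels 0) "COVID-19")],
        PySem.List.enumerate labels 0) = _
  rw [ofList_nodup (pvFilt (PySem.List.enumerate labels 0) "Bacterial Pneumonia") (pvFilt_nodup _ _ hw),
      ofList_nodup (pvFilt (PySem.List.enumerate labels 0) "No Pneumonia (healthy)") (pvFilt_nodup _ _ hw),
      ofList_nodup (pvFilt (PySem.List.enumerate labels 0) "Viral Pneumonia") (pvFilt_nodup _ _ hw),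
      ofList_nodup (pvFilt (PySem.List.enumerate labels 0) "COVID-19") (pvFilt_nodup _ _ hw)]

lemma collect_labels_alt_eq (data : List Int) (labels : List String) :
    collect_labels_alt data labels =
      ([pvFilt (PySem.List.enumerate labels 0) "Bacterial Pneumonia",
        pvFilt (PySem.List.enumerate labels 0) "No Pneumonia (healthy)",
        pvFilt (PySem.List.enumerate labels 0) "Viral Pneumonia",
        pvFilt (PySem.List.enumerate labels 0) "COVID-19"],
       PySem.List.enumerate labels 0) := by
  unfold collect_labels_alt
  have := alt_foldl labels 0 [] [] [] [] []
    (by simp) (by simp) (by simp) (by simp) (by simp)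
  simp only [PySem.Dict.empty, PySem.Set.empty] at this ⊢
  rw [this]
  simp

-- ===== VERDICT (by name: the statement is the Claim_ definition above) =====
theorem collect_labels_spec : Claim_equal_collect_labels := by
  intro data labels _
  unfold Spec_collect_labels
  rw [collect_labels_eq, collect_labels_alt_eq]
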